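-- pv_equiv track=rewrite | github.com/helisudani0/click2fix | backend/api/governance.py | _select_classification
-- ===== SOURCE A (Python) =====
-- from typing import Any, Dict, List, Optional
--
-- _CLASSIFICATION_WEIGHT = {
--     "expected_admin_activity": 1,
--     "review_required": 2,
--     "suspicious": 3,
-- }
--
-- def _select_classification(candidates: List[str], default_value: str = "review_required") -> str:
--     if not candidates:
--         return default_value
--     best = default_value
--     best_weight = _CLASSIFICATION_WEIGHT.get(best, 0)
--     for item in candidates:
--         weight = _CLASSIFICATION_WEIGHT.get(item, 0)
--         if weight > best_weight:
--             best = item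
--             best_weight = weight
--     return best
-- ===== SOURCE B (Python) =====
-- from typing import List
--
-- _CLASSIFICATION_WEIGHT = {
--     "expected_admin_activity": 1,
--     "review_required": 2,
--     "suspicious": 3,
-- }
--
-- def _select_classification(candidates: List[str], default_value: str = "review_required") -> str:
--     cand = set(candidates)
--     dw = _CLASSIFICATION_WEIGHT.get(default_value, 0)
--     for cls in sorted(_CLASSIFICATION_WEIGHT, key=_CLASSIFICATION_WEIGHT.get, reverse=True):
--         if _CLASSIFICATION_WEIGHT[cls] > dw and cls in cand:
--             return cls
--     return default_value
-- ===== Notes on version B (the rewrite author's own statement) =====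
-- stated objective: alternative
-- what changed: Instead of scanning candidates with a running maximum, B iterates the fixed weight table in descending weight order and returns the first classification that both beats the default's weight and occurs in the candidate set.
import Mathlib
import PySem

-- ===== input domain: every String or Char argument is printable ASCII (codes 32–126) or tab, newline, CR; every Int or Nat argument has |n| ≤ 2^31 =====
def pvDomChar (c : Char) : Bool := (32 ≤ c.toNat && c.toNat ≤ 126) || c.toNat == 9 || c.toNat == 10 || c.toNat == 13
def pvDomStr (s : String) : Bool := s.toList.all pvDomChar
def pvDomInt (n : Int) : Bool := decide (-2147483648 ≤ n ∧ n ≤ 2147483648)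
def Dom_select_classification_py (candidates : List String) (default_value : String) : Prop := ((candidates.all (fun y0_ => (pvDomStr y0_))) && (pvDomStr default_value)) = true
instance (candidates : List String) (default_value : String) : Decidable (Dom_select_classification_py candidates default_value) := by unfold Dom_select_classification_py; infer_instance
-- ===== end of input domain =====

-- B replaces A's running-maximum scan over the candidates by a first-match scan over the
-- weight table in descending weight order (objective: alternative, same cost).

-- shared module constant _CLASSIFICATION_WEIGHT
def classificationWeight : PySem.Dict String Int :=
  PySem.Dict.ofList [("expected_admin_activity", 1), ("review_required", 2), ("suspicious", 3)]

-- ===== PORT A =====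
def select_classification_py (candidates : List String) (default_value : String) : String :=
  if candidates = [] then default_value
  else
    (candidates.foldl
      (fun (st : String × Int) item =>
        let weight := PySem.Dict.getD classificationWeight item 0
        if st.2 < weight then (item, weight) else st)
      (default_value, PySem.Dict.getD classificationWeight default_value 0)).1

-- ===== PORT B =====
def select_classification_py_alt (candidates : List String) (default_value : String) : String :=
  let cand : PySem.Set String := PySem.Set.ofList candidates
  let dw := PySem.Dict.getD classificationWeight default_value 0
  match (PySem.List.sorted (PySem.Dict.keys classificationWeight)
          (fun k => PySem.Dict.getD classificationWeight k 0) true).find?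
        (fun cls => decide (dw < PySem.Dict.getD classificationWeight cls 0)
                    && PySem.Set.contains cand cls) with
  | some cls => cls
  | none => default_value

-- ===== PRECONDITION & SPEC =====
def Spec_select_classification_py (candidates : List String) (default_value : String) (out : String) : Prop := out = select_classification_py_alt candidates default_value
instance (candidates : List String) (default_value : String) (out : String) : Decidable (Spec_select_classification_py candidates default_value out) := by unfold Spec_select_classification_py; infer_instance

-- ===== CLAIM (what is proved, stated in full; the proofs are below) =====
def Claim_equal_select_classification_py : Prop := ∀ (candidates : List String) (default_value : String), Dom_select_classification_py candidates default_value → Spec_select_classification_py candidates default_value (select_classification_py candidates default_value)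

-- ===== LEMMAS AND PROOFS =====

-- closed form of the weight lookup
def wt (s : String) : Int :=
  if s = "suspicious" then 3 else if s = "review_required" then 2
  else if s = "expected_admin_activity" then 1 else 0

lemma getD_cw (s : String) : PySem.Dict.getD classificationWeight s 0 = wt s := by
  have h : classificationWeight =
      PySem.Dict.mk [("expected_admin_activity", 1), ("review_required", 2), ("suspicious", 3)] := by rfl
  rw [h, PySem.Dict.getD_eq_get?_getD]
  simp only [PySem.Dict.get?_mk_cons, beq_iff_eq, wt]
  by_cases h1 : s = "suspicious" <;> by_cases h2 : s = "review_required" <;>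
    by_cases h3 : s = "expected_admin_activity" <;>
    simp_all [eq_comm, show (PySem.Dict.mk ([] : List (String × Int))).get? s = none from
      PySem.Dict.get?_empty ..]

lemma wt_nonneg (s : String) : 0 ≤ wt s := by unfold wt; split_ifs <;> omega

lemma wt_le_three (s : String) : wt s ≤ 3 := by unfold wt; split_ifs <;> omega

-- the name determined by a positive weight
def nameOf (m : Int) : String :=
  if m = 3 then "suspicious" else if m = 2 then "review_required"
  else if m = 1 then "expected_admin_activity" else ""

lemma nameOf_wt (c : String) (h : 1 ≤ wt c) : nameOf (wt c) = c := by
  unfold wt at *; unfold nameOf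
  split_ifs at * <;> simp_all

-- running maximum of the weights
def M (cs : List String) : Int := (cs.map wt).foldl max 0

lemma foldl_max_le_iff (l : List Int) (a k : Int) :
    l.foldl max a ≤ k ↔ a ≤ k ∧ ∀ x ∈ l, x ≤ k := by
  induction l generalizing a with
  | nil => simp
  | cons x xs ih => simp only [List.foldl, ih]; rw [max_le_iff]; simp; tauto

lemma foldl_max_comm (l : List Int) (a b : Int) :
    l.foldl max (max a b) = max a (l.foldl max b) := by
  induction l generalizing b with
  | nil => rfl
  | cons x xs ih =>
    simp only [List.foldl]
    rw [max_assoc, ih]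

lemma M_cons (c : String) (cs : List String) : M (c :: cs) = max (wt c) (M cs) := by
  unfold M
  simp only [List.map, List.foldl]
  rw [max_comm, foldl_max_comm]

lemma M_le_iff (cs : List String) (k : Int) (hk : 0 ≤ k) :
    M cs ≤ k ↔ ∀ c ∈ cs, wt c ≤ k := by
  unfold M; rw [foldl_max_le_iff]; simp [hk]

lemma M_nonneg (cs : List String) : 0 ≤ M cs := (PySem.List.le_foldl_max (cs.map wt) 0).1

lemma wt_le_M (cs : List String) (c : String) (hc : c ∈ cs) : wt c ≤ M cs :=
  (PySem.List.le_foldl_max (cs.map wt) 0).2 (wt c) (List.mem_map_of_mem hc)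

-- A's loop computes: the initial value unless some candidate strictly beats its weight,
-- else the (unique) name of the maximal weight present.
lemma foldA_eq (cs : List String) (b : String) (w : Int) (hw : 0 ≤ w) :
    (cs.foldl (fun (st : String × Int) item =>
        if st.2 < wt item then (item, wt item) else st) (b, w)).1
      = if M cs ≤ w then b else nameOf (M cs) := by
  induction cs generalizing b w with
  | nil => simp [M, hw]
  | cons c cs ih =>
    have hM := M_cons c cs
    simp only [List.foldl]
    by_cases hc : w < wt c
    · rw [if_pos hc, ih c (wt c) (by have := wt_nonneg c; omega)]
      by_cases hMc : M cs ≤ wt c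
      · rw [if_pos hMc, if_neg (by omega), hM, max_eq_left hMc, nameOf_wt c (by omega)]
      · rw [if_neg hMc, if_neg (by rw [hM]; omega), hM, max_eq_right (by omega)]
    · rw [if_neg hc, ih b w hw]
      by_cases hMs : M cs ≤ w
      · rw [if_pos hMs, if_pos (by rw [hM]; omega)]
      · rw [if_neg hMs, if_neg (by rw [hM]; omega), hM, max_eq_right (by omega)]

lemma A_closed (cs : List String) (d : String) :
    select_classification_py cs d = if M cs ≤ wt d then d else nameOf (M cs) := by
  unfold select_classification_py
  have hstep : (fun (st : String × Int) item =>
      let weight := PySem.Dict.getD classificationWeight item 0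
      if st.2 < weight then (item, weight) else st)
      = (fun (st : String × Int) item => if st.2 < wt item then (item, wt item) else st) := by
    funext st item; simp only [getD_cw]
  by_cases h : cs = []
  · subst h; simp [M, wt_nonneg]
  · rw [if_neg h, getD_cw, hstep, foldA_eq cs d (wt d) (wt_nonneg d)]

lemma sortedKeys_eq :
    PySem.List.sorted (PySem.Dict.keys classificationWeight)
      (fun k => PySem.Dict.getD classificationWeight k 0) true
      = ["suspicious", "review_required", "expected_admin_activity"] := by rfl

lemma contains_ofList (cs : List String) (x : String) :
    (PySem.Set.ofList cs).contains x = decide (x ∈ cs) := by simp [pysem]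

lemma B_closed (cs : List String) (d : String) :
    select_classification_py_alt cs d =
      if wt d < 3 ∧ "suspicious" ∈ cs then "suspicious"
      else if wt d < 2 ∧ "review_required" ∈ cs then "review_required"
      else if wt d < 1 ∧ "expected_admin_activity" ∈ cs then "expected_admin_activity"
      else d := by
  unfold select_classification_py_alt
  rw [sortedKeys_eq]
  simp only [List.find?, getD_cw, contains_ofList]
  have hws : wt "suspicious" = 3 := by rfl
  have hwr : wt "review_required" = 2 := by rfl
  have hwe : wt "expected_admin_activity" = 1 := by rfl
  rw [hws, hwr, hwe]
  have hd : wt d = 0 ∨ wt d = 1 ∨ wt d = 2 ∨ wt d = 3 := by unfold wt; split_ifs <;> omega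
  by_cases hs : "suspicious" ∈ cs <;> by_cases hr : "review_required" ∈ cs <;>
    by_cases he : "expected_admin_activity" ∈ cs <;> rcases hd with h | h | h | h <;>
    simp_all

-- membership characterisation of the maximum weight
lemma M_char (cs : List String) :
    M cs = if "suspicious" ∈ cs then 3
           else if "review_required" ∈ cs then 2
           else if "expected_admin_activity" ∈ cs then 1 else 0 := by
  by_cases hs : "suspicious" ∈ cs
  · have hge : (3 : Int) ≤ M cs := by have := wt_le_M cs _ hs; unfold wt at this; simp at this; omega
    have hub : M cs ≤ 3 := (M_le_iff cs 3 (by omega)).mpr (fun c _ => wt_le_three c)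
    simp only [if_pos hs]; omega
  · by_cases hr : "review_required" ∈ cs
    · have hle : M cs ≤ 2 := (M_le_iff cs 2 (by omega)).mpr (fun c hc => by
        unfold wt; rw [if_neg (by rintro rfl; exact hs hc)]; split_ifs <;> omega)
      have hge : (2 : Int) ≤ M cs := by have := wt_le_M cs _ hr; unfold wt at this; simp at this; omega
      simp only [if_neg hs, if_pos hr]; omega
    · by_cases he : "expected_admin_activity" ∈ cs
      · have hle : M cs ≤ 1 := (M_le_iff cs 1 (by omega)).mpr (fun c hc => by
          unfold wt
          rw [if_neg (by rintro rfl; exact hs hc), if_neg (by rintro rfl; exact hr hc)]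
          split_ifs <;> omega)
        have hge : (1 : Int) ≤ M cs := by have := wt_le_M cs _ he; unfold wt at this; simp at this; omega
        simp only [if_neg hs, if_neg hr, if_pos he]; omega
      · have hle : M cs ≤ 0 := (M_le_iff cs 0 le_rfl).mpr (fun c hc => by
          unfold wt
          rw [if_neg (by rintro rfl; exact hs hc), if_neg (by rintro rfl; exact hr hc),
            if_neg (by rintro rfl; exact he hc)])
        have hge := M_nonneg cs
        simp only [if_neg hs, if_neg hr, if_neg he]; omega

-- ===== VERDICT (by name: the statement is the Claim_ definition above) =====
theorem select_classification_py_spec : Claim_equal_select_classification_py := by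
  intro cs d _
  unfold Spec_select_classification_py
  rw [A_closed, B_closed, M_char]
  have hd0 := wt_nonneg d
  have hd3 := wt_le_three d
  by_cases hs : "suspicious" ∈ cs <;> by_cases hr : "review_required" ∈ cs <;>
    by_cases he : "expected_admin_activity" ∈ cs <;>
    simp only [hs, hr, he, if_true, if_false, and_true, and_false, nameOf] <;>
    split_ifs <;> first | rfl | omega
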